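-- pv_equiv track=rewrite | github.com/7carry7/KG-based-course-KG | kg_course_project/extraction/ner.py | extract_entities_by_vocab
-- ===== SOURCE A (Python) =====
-- def extract_entities_by_vocab(text, vocab):
--     """
--     (MVP) 基于词典的实体抽取。
--     :param text: 清洗后的文本
--     :param vocab: 字典, 格式 { "Label1": ["entity1", "entity2"], ... }
--     :return: 实体列表, 格式 [{"name": "RDF", "label": "Concept"}]
--     """
--     entities_found = []
--     found_names = set()  # 避免重复添加
--
--     for label, names in vocab.items():
--         for name in names:
--             # 确保我们匹配的是完整的词 (虽然中文不明显，但对英文有好处)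
--             # 简单的查找
--             if name in text and name not in found_names:
--                 entities_found.append({"name": name, "label": label})
--                 found_names.add(name)
--
--     return entities_found
-- ===== SOURCE B (Python) =====
-- def extract_entities_by_vocab(text, vocab):
--     # Index the text once: the set of all its substrings whose length is a
--     # vocab-name length; each membership test then avoids rescanning the text.
--     lengths = {len(name) for names in vocab.values() for name in names}
--     subs = {text[i:i + L] for L in lengths for i in range(len(text) - L + 1)}
--     first = {}  # first label seen for each name, in first-occurrence order
--     for label, names in vocab.items():
--         for name in names:
--             first.setdefault(name, label)
--     return [{"name": n, "label": l} for n, l in first.items() if n in subs]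
-- ===== Notes on version B (the rewrite author's own statement) =====
-- stated objective: faster
-- what changed: B indexes the text once into a hash set of all its substrings of the occurring name lengths and replaces A's per-name substring scan by an O(1) set lookup, and it splits A's interleaved dedup-and-match pass into a first-occurrence dict followed by a filter.
import Mathlib
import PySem

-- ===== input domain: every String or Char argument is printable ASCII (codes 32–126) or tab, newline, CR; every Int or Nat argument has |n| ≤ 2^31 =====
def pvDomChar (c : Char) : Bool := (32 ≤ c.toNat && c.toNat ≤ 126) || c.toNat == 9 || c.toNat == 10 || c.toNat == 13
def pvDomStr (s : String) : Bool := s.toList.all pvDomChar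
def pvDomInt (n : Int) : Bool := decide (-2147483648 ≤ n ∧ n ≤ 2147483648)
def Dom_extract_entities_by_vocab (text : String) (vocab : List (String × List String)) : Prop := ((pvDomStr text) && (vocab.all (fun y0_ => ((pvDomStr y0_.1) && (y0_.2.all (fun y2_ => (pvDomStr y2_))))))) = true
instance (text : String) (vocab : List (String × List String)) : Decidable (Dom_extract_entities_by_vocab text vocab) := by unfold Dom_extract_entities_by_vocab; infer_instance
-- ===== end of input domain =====

-- B replaces A's per-name substring scan with a hash set of the text's substrings (built once) and
-- splits the interleaved dedup-and-match pass into a first-occurrence dict followed by a filter (objective: faster).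
-- ===== PORT A =====
def extract_entities_by_vocab (text : String) (vocab : List (String × List String)) : List (List (String × String)) :=
  (vocab.foldl
    (fun (st : List (List (String × String)) × PySem.Set String) lb =>
      lb.2.foldl
        (fun st name =>
          if PySem.Str.isIn name text && !(PySem.Set.contains st.2 name) then
            (st.1 ++ [[("name", name), ("label", lb.1)]], PySem.Set.add st.2 name)
          else st)
        st)
    ([], PySem.Set.empty)).1

-- ===== PORT B =====
-- B-side helper: the set comprehension {text[i:i+L] for L in lengths for i in range(len(text)-L+1)}
def pvSubs (text : String) (lens : List Int) : PySem.Set String :=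
  lens.foldl
    (fun s L =>
      (PySem.List.pyRange 0 (PySem.Str.len text - L + 1) 1).foldl
        (fun s i => PySem.Set.add s (PySem.Str.slice text (some i) (some (i + L)))) s)
    PySem.Set.empty

def extract_entities_by_vocab_alt (text : String) (vocab : List (String × List String)) : List (List (String × String)) :=
  let lengths : PySem.Set Int :=
    PySem.Set.ofList (vocab.flatMap (fun lb => lb.2.map (fun n => PySem.Str.len n)))
  let subs : PySem.Set String := pvSubs text lengths
  let first : PySem.Dict String String :=
    vocab.foldl
      (fun (d : PySem.Dict String String) lb =>
        lb.2.foldl (fun d name => d.setdefault name lb.1) d)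
      PySem.Dict.empty
  (first.items.filter (fun pr => PySem.Set.contains subs pr.1)).map
    (fun pr => [("name", pr.1), ("label", pr.2)])

-- ===== PRECONDITION & SPEC =====
def Spec_extract_entities_by_vocab (text : String) (vocab : List (String × List String)) (out : List (List (String × String))) : Prop := out = extract_entities_by_vocab_alt text vocab
instance (text : String) (vocab : List (String × List String)) (out : List (List (String × String))) : Decidable (Spec_extract_entities_by_vocab text vocab out) := by unfold Spec_extract_entities_by_vocab; infer_instance

-- ===== CLAIM (what is proved, stated in full; the proofs are below) =====
def Claim_equal_extract_entities_by_vocab : Prop := ∀ (text : String) (vocab : List (String × List String)), Dom_extract_entities_by_vocab text vocab → Spec_extract_entities_by_vocab text vocab (extract_entities_by_vocab text vocab)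

-- ===== LEMMAS AND PROOFS =====

-- proof-only abbreviations
def pvFlatOf (vocab : List (String × List String)) : List (String × String) :=
  vocab.flatMap (fun lb => lb.2.map (fun n => (n, lb.1)))

def pvFirst (pairs : List (String × String)) (d : PySem.Dict String String) : PySem.Dict String String :=
  pairs.foldl (fun d pr => d.setdefault pr.1 pr.2) d

-- a nested fold over an association list is the fold over the flattened (name, label) pairs
theorem pvFoldlNested {σ : Type} (vocab : List (String × List String)) (F : σ → String → String → σ)
    (init : σ) :
    vocab.foldl (fun st lb => lb.2.foldl (fun st name => F st name lb.1) st) init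
      = (pvFlatOf vocab).foldl (fun st pr => F st pr.1 pr.2) init := by
  induction vocab generalizing init with
  | nil => rfl
  | cons lb rest ih =>
    simp only [pvFlatOf, List.flatMap_cons, List.foldl_cons, List.foldl_append, List.foldl_map] at *
    rw [ih]

-- membership in the substring set built by pvSubs (generalized over the accumulator)
theorem pvMemSubsAux (text : String) (lens : List Int) (s : PySem.Set String) (x : String) :
    x ∈ lens.foldl
        (fun s L =>
          (PySem.List.pyRange 0 (PySem.Str.len text - L + 1) 1).foldl
            (fun s i => PySem.Set.add s (PySem.Str.slice text (some i) (some (i + L)))) s) s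
      ↔ x ∈ s ∨ ∃ L ∈ lens, ∃ i : Int, (0 ≤ i ∧ i < PySem.Str.len text - L + 1) ∧
          x = PySem.Str.slice text (some i) (some (i + L)) := by
  induction lens generalizing s with
  | nil => simp
  | cons L rest ih =>
    simp only [List.foldl_cons]
    rw [ih]
    have hinner :
        (PySem.List.pyRange 0 (PySem.Str.len text - L + 1) 1).foldl
          (fun s i => PySem.Set.add s (PySem.Str.slice text (some i) (some (i + L)))) s
        = PySem.Set.update s ((PySem.List.pyRange 0 (PySem.Str.len text - L + 1) 1).map
            (fun i => PySem.Str.slice text (some i) (some (i + L)))) := by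
      exact List.foldl_map.symm
    rw [hinner, PySem.Set.mem_update]
    simp only [List.mem_map, PySem.List.mem_pyRange_one, List.mem_cons]
    constructor
    · rintro ((hx | ⟨i, hi, rfl⟩) | ⟨L', hL', i, hi, rfl⟩)
      · exact Or.inl hx
      · exact Or.inr ⟨L, Or.inl rfl, i, hi, rfl⟩
      · exact Or.inr ⟨L', Or.inr hL', i, hi, rfl⟩
    · rintro (hx | ⟨L', (rfl | hL'), i, hi, rfl⟩)
      · exact Or.inl (Or.inl hx)
      · exact Or.inl (Or.inr ⟨i, hi, rfl⟩)
      · exact Or.inr ⟨L', hL', i, hi, rfl⟩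

theorem pvMemSubs (text : String) (lens : List Int) (x : String) :
    x ∈ pvSubs text lens
      ↔ ∃ L ∈ lens, ∃ i : Int, (0 ≤ i ∧ i < PySem.Str.len text - L + 1) ∧
          x = PySem.Str.slice text (some i) (some (i + L)) := by
  rw [pvSubs, pvMemSubsAux]
  simp [PySem.Set.empty]

-- the key exchange: membership in the precomputed substring set is Python's 'name in text'
theorem pvSubs_iff_isIn (text n : String) (lens : List Int)
    (hn : PySem.Str.len n ∈ lens) (hpos : ∀ L ∈ lens, 0 ≤ L) :
    n ∈ pvSubs text lens ↔ PySem.Str.isIn n text = true := by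
  rw [pvMemSubs]
  constructor
  · rintro ⟨L, hL, i, ⟨hi0, _⟩, rfl⟩
    have hL0 : 0 ≤ L := hpos L hL
    rw [PySem.Str.isIn_eq, PySem.Chars.isIn_iff_infix]
    have ht : (PySem.Str.slice text (some i) (some (i + L))).toList
        = List.take ((i + L).toNat - i.toNat) (List.drop i.toNat text.toList) := by
      rw [PySem.Str.toList_slice, PySem.Chars.slice_eq_listSlice,
        PySem.List.slice_toNat text.toList hi0 (by omega)]
    rw [ht]
    exact ((List.take_prefix _ _).isInfix).trans ((List.drop_suffix _ _).isInfix)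
  · intro hI
    rw [PySem.Str.isIn_eq] at hI
    obtain ⟨j, hj⟩ := (PySem.Chars.exists_prefix_drop_iff_isIn n.toList text.toList).mpr hI
    set Tn := text.toList.length with hTn
    set Ln := n.toList.length with hLn
    set j' := min j Tn with hj'
    have hdrop : n.toList <+: List.drop j' text.toList := by
      by_cases h : j ≤ Tn
      · simpa [hj', min_eq_left h] using hj
      · have h1 : List.drop j text.toList = [] := by
          apply List.drop_eq_nil_of_le; omega
        have h2 : n.toList = [] := List.prefix_nil.mp (h1 ▸ hj)
        simp [h2]
    have hlen : Ln ≤ Tn - j' := by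
      have := hdrop.length_le
      simpa [List.length_drop] using this
    have hj'le : j' ≤ Tn := by omega
    refine ⟨PySem.Str.len n, hn, (j' : Int), ⟨by positivity, ?_⟩, ?_⟩
    · rw [PySem.Str.len_eq, PySem.Str.len_eq]
      omega
    · rw [← String.toList_inj, PySem.Str.toList_slice, PySem.Chars.slice_eq_listSlice,
        PySem.Str.len_eq]
      rw [PySem.List.slice_natCast_add text.toList j' Ln]
      exact List.prefix_iff_eq_take.mp hdrop

theorem pvSetContains (s : PySem.Set String) (x : String) :
    PySem.Set.contains s x = decide (x ∈ s) := by
  simp [PySem.Set.contains]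

theorem pvContainsSubs (text n : String) (lens : List Int)
    (hn : PySem.Str.len n ∈ lens) (hpos : ∀ L ∈ lens, 0 ≤ L) :
    PySem.Set.contains (pvSubs text lens) n = PySem.Str.isIn n text := by
  have h := pvSubs_iff_isIn text n lens hn hpos
  rw [pvSetContains]
  cases hI : PySem.Str.isIn n text
  · rw [decide_eq_false (fun hmem => by rw [h, hI] at hmem; exact Bool.false_ne_true hmem)]
  · rw [decide_eq_true (h.mpr hI)]

-- A's interleaved filter+dedup pass equals B's dedup-dict followed by a filter
theorem pvFlat (text : String) (pairs : List (String × String)) :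
    ∀ (d : PySem.Dict String String) (out0 : List (List (String × String))), d.keys.Nodup →
    pairs.foldl
        (fun (st : List (List (String × String)) × PySem.Set String) pr =>
          if PySem.Str.isIn pr.1 text && !(PySem.Set.contains st.2 pr.1) then
            (st.1 ++ [[("name", pr.1), ("label", pr.2)]], PySem.Set.add st.2 pr.1)
          else st)
        (out0 ++ ((d.items.filter (fun pr => PySem.Str.isIn pr.1 text)).map
            (fun pr => [("name", pr.1), ("label", pr.2)])),
         (d.items.filter (fun pr => PySem.Str.isIn pr.1 text)).map (fun pr => pr.1))
      = (out0 ++ (((pvFirst pairs d).items.filter (fun pr => PySem.Str.isIn pr.1 text)).map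
            (fun pr => [("name", pr.1), ("label", pr.2)])),
         ((pvFirst pairs d).items.filter (fun pr => PySem.Str.isIn pr.1 text)).map (fun pr => pr.1)) := by
  induction pairs with
  | nil => intro d out0 _; rfl
  | cons pr rest ih =>
    intro d out0 hnd
    have hfirst : pvFirst (pr :: rest) d = pvFirst rest (d.setdefault pr.1 pr.2) := by
      simp [pvFirst]
    rw [hfirst]
    simp only [List.foldl_cons]
    by_cases hc : d.contains pr.1 = true
    · have hd' : d.setdefault pr.1 pr.2 = d := PySem.Dict.setdefault_of_contains d pr.2 hc
      have hstep : (if PySem.Str.isIn pr.1 text &&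
            !(PySem.Set.contains ((d.items.filter (fun pr => PySem.Str.isIn pr.1 text)).map (fun pr => pr.1)) pr.1) then
            ((out0 ++ ((d.items.filter (fun pr => PySem.Str.isIn pr.1 text)).map
                (fun pr => [("name", pr.1), ("label", pr.2)]))) ++ [[("name", pr.1), ("label", pr.2)]],
             PySem.Set.add ((d.items.filter (fun pr => PySem.Str.isIn pr.1 text)).map (fun pr => pr.1)) pr.1)
          else
            (out0 ++ ((d.items.filter (fun pr => PySem.Str.isIn pr.1 text)).map
                (fun pr => [("name", pr.1), ("label", pr.2)])),
             (d.items.filter (fun pr => PySem.Str.isIn pr.1 text)).map (fun pr => pr.1)))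
          = (out0 ++ ((d.items.filter (fun pr => PySem.Str.isIn pr.1 text)).map
              (fun pr => [("name", pr.1), ("label", pr.2)])),
             (d.items.filter (fun pr => PySem.Str.isIn pr.1 text)).map (fun pr => pr.1)) := by
        cases hI : PySem.Str.isIn pr.1 text
        · simp
        · have hk : pr.1 ∈ d.keys := (PySem.Dict.contains_iff_mem_keys d pr.1).mp hc
          obtain ⟨q, hq, hq1⟩ := List.mem_map.mp hk
          have hmem : pr.1 ∈ (d.items.filter (fun pr => PySem.Str.isIn pr.1 text)).map (fun pr => pr.1) := by
            refine List.mem_map.mpr ⟨q, List.mem_filter.mpr ⟨hq, ?_⟩, hq1⟩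
            rw [hq1, hI]
          simp only [pvSetContains, decide_eq_true hmem]
          simp
      rw [hstep, hd']
      exact ih d out0 hnd
    · have hcf : d.contains pr.1 = false := Bool.eq_false_iff.mpr hc
      have hd' : d.setdefault pr.1 pr.2 = d.insert pr.1 pr.2 :=
        PySem.Dict.setdefault_of_not_contains d pr.2 hcf
      have hitems : (d.insert pr.1 pr.2).items = d.items ++ [pr] := by
        rw [PySem.Dict.items_insert_of_not_contains d pr.2 hcf]
      have hnd' : (d.insert pr.1 pr.2).keys.Nodup :=
        PySem.Dict.nodup_keys_insert d pr.1 pr.2 hnd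
      have hnk : pr.1 ∉ d.keys := fun h => hc ((PySem.Dict.contains_iff_mem_keys d pr.1).mpr h)
      have hns : pr.1 ∉ (d.items.filter (fun pr => PySem.Str.isIn pr.1 text)).map (fun pr => pr.1) := by
        intro h
        obtain ⟨q, hq, hq1⟩ := List.mem_map.mp h
        exact hnk (hq1 ▸ PySem.Dict.mem_keys_of_mem_items d (List.mem_filter.mp hq).1)
      cases hI : PySem.Str.isIn pr.1 text
      · have hfl : (d.insert pr.1 pr.2).items.filter (fun pr => PySem.Str.isIn pr.1 text)
            = d.items.filter (fun pr => PySem.Str.isIn pr.1 text) := by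
          rw [hitems, List.filter_append]
          simp only [List.filter_cons, List.filter_nil, hI]
          simp
        have hstep : (if false &&
              !(PySem.Set.contains ((d.items.filter (fun pr => PySem.Str.isIn pr.1 text)).map (fun pr => pr.1)) pr.1) then
              ((out0 ++ ((d.items.filter (fun pr => PySem.Str.isIn pr.1 text)).map
                  (fun pr => [("name", pr.1), ("label", pr.2)]))) ++ [[("name", pr.1), ("label", pr.2)]],
               PySem.Set.add ((d.items.filter (fun pr => PySem.Str.isIn pr.1 text)).map (fun pr => pr.1)) pr.1)
            else
              (out0 ++ ((d.items.filter (fun pr => PySem.Str.isIn pr.1 text)).map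
                  (fun pr => [("name", pr.1), ("label", pr.2)])),
               (d.items.filter (fun pr => PySem.Str.isIn pr.1 text)).map (fun pr => pr.1)))
            = (out0 ++ ((d.items.filter (fun pr => PySem.Str.isIn pr.1 text)).map
                (fun pr => [("name", pr.1), ("label", pr.2)])),
               (d.items.filter (fun pr => PySem.Str.isIn pr.1 text)).map (fun pr => pr.1)) := by
          simp
        rw [hstep, hd']
        have := ih (d.insert pr.1 pr.2) out0 hnd'
        rw [hfl] at this
        exact this
      · have hfl : (d.insert pr.1 pr.2).items.filter (fun pr => PySem.Str.isIn pr.1 text)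
            = d.items.filter (fun pr => PySem.Str.isIn pr.1 text) ++ [pr] := by
          rw [hitems, List.filter_append]
          simp only [List.filter_cons, List.filter_nil, hI]
          simp
        have hstep : (if true &&
              !(PySem.Set.contains ((d.items.filter (fun pr => PySem.Str.isIn pr.1 text)).map (fun pr => pr.1)) pr.1) then
              ((out0 ++ ((d.items.filter (fun pr => PySem.Str.isIn pr.1 text)).map
                  (fun pr => [("name", pr.1), ("label", pr.2)]))) ++ [[("name", pr.1), ("label", pr.2)]],
               PySem.Set.add ((d.items.filter (fun pr => PySem.Str.isIn pr.1 text)).map (fun pr => pr.1)) pr.1)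
            else
              (out0 ++ ((d.items.filter (fun pr => PySem.Str.isIn pr.1 text)).map
                  (fun pr => [("name", pr.1), ("label", pr.2)])),
               (d.items.filter (fun pr => PySem.Str.isIn pr.1 text)).map (fun pr => pr.1)))
            = ((out0 ++ ((d.items.filter (fun pr => PySem.Str.isIn pr.1 text)).map
                (fun pr => [("name", pr.1), ("label", pr.2)]))) ++ [[("name", pr.1), ("label", pr.2)]],
               ((d.items.filter (fun pr => PySem.Str.isIn pr.1 text)).map (fun pr => pr.1)) ++ [pr.1]) := by
          simp only [PySem.Set.add, pvSetContains, decide_eq_false hns]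
          simp
        rw [hstep, hd']
        have := ih (d.insert pr.1 pr.2) out0 hnd'
        rw [hfl] at this
        simp only [List.map_append, List.map_cons, List.map_nil, ← List.append_assoc] at this ⊢
        exact this

theorem pvMemKeysFirst (pairs : List (String × String)) :
    ∀ (d : PySem.Dict String String), ∀ k ∈ (pvFirst pairs d).keys, k ∈ d.keys ∨ k ∈ pairs.map (fun pr => pr.1) := by
  induction pairs with
  | nil => intro d k hk; exact Or.inl hk
  | cons pr rest ih =>
    intro d k hk
    have h1 : pvFirst (pr :: rest) d = pvFirst rest (d.setdefault pr.1 pr.2) := by simp [pvFirst]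
    rw [h1] at hk
    rcases ih _ k hk with h | h
    · rw [PySem.Dict.keys_setdefault] at h
      by_cases hc : d.contains pr.1 = true
      · rw [if_pos hc] at h; exact Or.inl h
      · rw [if_neg hc] at h
        rcases List.mem_append.mp h with h | h
        · exact Or.inl h
        · simp at h; subst h; exact Or.inr (by simp)
    · exact Or.inr (by simp [h])



-- ===== VERDICT (by name: the statement is the Claim_ definition above) =====
theorem extract_entities_by_vocab_spec : Claim_equal_extract_entities_by_vocab := by
  intro text vocab _
  unfold Spec_extract_entities_by_vocab
  have hA : extract_entities_by_vocab text vocab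
      = ((pvFirst (pvFlatOf vocab) PySem.Dict.empty).items.filter
          (fun pr => PySem.Str.isIn pr.1 text)).map (fun pr => [("name", pr.1), ("label", pr.2)]) := by
    have h1 := pvFoldlNested (σ := List (List (String × String)) × PySem.Set String) vocab
        (fun st n l => if PySem.Str.isIn n text && !(PySem.Set.contains st.2 n) then
            (st.1 ++ [[("name", n), ("label", l)]], PySem.Set.add st.2 n) else st)
        ([], PySem.Set.empty)
    have h2 := pvFlat text (pvFlatOf vocab) PySem.Dict.empty [] List.nodup_nil
    calc extract_entities_by_vocab text vocab
        = ((pvFlatOf vocab).foldl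
            (fun (st : List (List (String × String)) × PySem.Set String) pr =>
              if PySem.Str.isIn pr.1 text && !(PySem.Set.contains st.2 pr.1) then
                (st.1 ++ [[("name", pr.1), ("label", pr.2)]], PySem.Set.add st.2 pr.1)
              else st) ([], PySem.Set.empty)).1 := congrArg Prod.fst h1
      _ = _ := congrArg Prod.fst h2
  have hB : (vocab.foldl
        (fun (d : PySem.Dict String String) lb =>
          lb.2.foldl (fun d name => d.setdefault name lb.1) d)
        PySem.Dict.empty) = pvFirst (pvFlatOf vocab) PySem.Dict.empty :=
    pvFoldlNested vocab (fun d n l => d.setdefault n l) PySem.Dict.empty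
  show extract_entities_by_vocab text vocab
      = ((vocab.foldl
            (fun (d : PySem.Dict String String) lb =>
              lb.2.foldl (fun d name => d.setdefault name lb.1) d)
            PySem.Dict.empty).items.filter
          (fun pr => PySem.Set.contains
            (pvSubs text (PySem.Set.ofList (vocab.flatMap (fun lb => lb.2.map (fun n => PySem.Str.len n)))))
            pr.1)).map (fun pr => [("name", pr.1), ("label", pr.2)])
  rw [hA, hB]
  have hfc : (pvFirst (pvFlatOf vocab) PySem.Dict.empty).items.filter
        (fun pr => PySem.Str.isIn pr.1 text)
      = (pvFirst (pvFlatOf vocab) PySem.Dict.empty).items.filter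
        (fun pr => PySem.Set.contains
          (pvSubs text (PySem.Set.ofList (vocab.flatMap (fun lb => lb.2.map (fun n => PySem.Str.len n)))))
          pr.1) := by
    apply List.filter_congr
    intro q hq
    have hkey : q.1 ∈ (pvFirst (pvFlatOf vocab) PySem.Dict.empty).keys :=
      PySem.Dict.mem_keys_of_mem_items _ hq
    have hname : q.1 ∈ (pvFlatOf vocab).map (fun pr => pr.1) := by
      rcases pvMemKeysFirst (pvFlatOf vocab) PySem.Dict.empty q.1 hkey with h | h
      · exact absurd h (List.not_mem_nil)
      · exact h
    obtain ⟨lb, hlb, hq1⟩ : ∃ lb ∈ vocab, q.1 ∈ lb.2 := by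
      simp only [pvFlatOf, List.map_flatMap, List.mem_flatMap] at hname
      obtain ⟨lb, hlb, h⟩ := hname
      simp only [List.map_map, List.mem_map] at h
      obtain ⟨n, hn, rfl⟩ := h
      exact ⟨lb, hlb, hn⟩
    have hn : PySem.Str.len q.1 ∈ PySem.Set.ofList (vocab.flatMap (fun lb => lb.2.map (fun n => PySem.Str.len n))) := by
      rw [PySem.Set.mem_ofList]
      exact List.mem_flatMap.mpr ⟨lb, hlb, List.mem_map.mpr ⟨q.1, hq1, rfl⟩⟩
    have hpos : ∀ L ∈ PySem.Set.ofList (vocab.flatMap (fun lb => lb.2.map (fun n => PySem.Str.len n))), (0:Int) ≤ L := by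
      intro L hL
      rw [PySem.Set.mem_ofList] at hL
      obtain ⟨lb', _, hL'⟩ := List.mem_flatMap.mp hL
      obtain ⟨m, _, rfl⟩ := List.mem_map.mp hL'
      rw [PySem.Str.len_eq]
      positivity
    exact (pvContainsSubs text q.1 _ hn hpos).symm
  rw [hfc]
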